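-- pv_equiv track=rewrite | github.com/patriimanciu/uni-work | sem 1/fp/assignments/a4/backtracking.py | mountain_iter_different
-- ===== SOURCE A (Python) =====
-- def is_mountain(data: list) -> bool:
--     """
--     Teh function checks if the list provided has a mountain aspect or not
--     :param data: given list
--     :return: True is the list has a mountain aspect and False otherwise
--     """
--     # peak gets the index of the maximum element of a sequence
--     # the max() function cannot be called on an empty list, therefore we first check if data has any elements
--     if len(data):
--         # index gets the index of the maximum element of data
--         peak = data.index(max(data))
--
--         # if peak is 0, it means that the first element is the maximum, therefore it cannot have a mountain aspect ->
--         # we return False. Same goes for len(data) - 1, which means that the last element is the max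
--         if peak == 0 or peak == len(data) - 1:
--             return False
--     else:
--         return False
--
--     # we check for the fist part of the list to be sorted ascending, up to peak's index
--     for i in range(peak):
--         if data[i] > data[i + 1]:
--             return False
--
--     # we check for the last part of the list to be sorted descending, from peak's index to the end
--     for i in range(peak, len(data) - 1):
--         if data[i] < data[i + 1]:
--             return False
--     return True
--
-- def mountain_iter_different(data: list):
--     # T(n) = O(2^n * k)  aprox. O(2^n)
--     result = []
--     length = len(data)
--     stack = [(0, [], 0)]
--
--     while stack:
--         index, subset, i = stack.pop()
--
--         if is_mountain(subset):
--             result.append(list(subset))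
--
--         while i < length:
--             if data[i] not in subset or (data[i] > subset[-1] and is_mountain(subset + [data[i]])):
--                 subset.append(data[i])
--                 stack.append((index + 1, list(subset), i + 1))
--                 subset.pop()
--             i += 1
--
--     return result
-- ===== SOURCE B (Python) =====
-- def is_mountain(data: list) -> bool:
--     if len(data):
--         peak = data.index(max(data))
--         if peak == 0 or peak == len(data) - 1:
--             return False
--     else:
--         return False
--     for i in range(peak):
--         if data[i] > data[i + 1]:
--             return False
--     for i in range(peak, len(data) - 1):
--         if data[i] < data[i + 1]:
--             return False
--     return True
--
--
-- def mountain_iter_different(data: list):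
--     # Recursive backtracking instead of an explicit stack; candidates are
--     # tried in descending index order to produce the same output order.
--     n = len(data)
--     result = []
--
--     def recurse(subset, start):
--         if is_mountain(subset):
--             result.append(list(subset))
--         for i in range(n - 1, start - 1, -1):
--             x = data[i]
--             if x not in subset or (x > subset[-1] and is_mountain(subset + [x])):
--                 subset.append(x)
--                 recurse(subset, i + 1)
--                 subset.pop()
--
--     recurse([], 0)
--     return result
-- ===== Notes on version B (the rewrite author's own statement) =====
-- stated objective: alternative
-- what changed: The explicit LIFO stack of (index, subset, i) tuples is replaced by a recursive backtracking helper that appends/pops on a shared subset and iterates candidate indices in descending order (matching the stack's pop order); the unused index counter is dropped.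
import Mathlib
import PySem

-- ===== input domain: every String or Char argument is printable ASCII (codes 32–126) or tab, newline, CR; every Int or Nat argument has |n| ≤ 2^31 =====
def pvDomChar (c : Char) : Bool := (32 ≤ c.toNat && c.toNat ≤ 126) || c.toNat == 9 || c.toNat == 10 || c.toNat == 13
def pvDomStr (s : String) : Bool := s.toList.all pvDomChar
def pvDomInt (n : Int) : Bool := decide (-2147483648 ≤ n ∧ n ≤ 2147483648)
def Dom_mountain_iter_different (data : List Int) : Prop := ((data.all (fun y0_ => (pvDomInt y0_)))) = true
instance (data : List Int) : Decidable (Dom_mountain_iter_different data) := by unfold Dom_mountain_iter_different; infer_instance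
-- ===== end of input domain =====

-- B replaces A's explicit LIFO stack by a recursive backtracking helper (candidates tried in
-- descending index order to match the stack's pop order); same asymptotic cost ("alternative").

-- ===== PORT A =====
-- helper is_mountain (used verbatim by both Python sources, so shared by both ports)
def is_mountain (data : List Int) : Bool :=
  if data.length ≠ 0 then
    let peak := (PySem.List.index? data ((PySem.List.max? data (fun x => x)).getD 0)).getD 0
    if peak = 0 ∨ peak = data.length - 1 then false
    else
      ((PySem.List.pyRange 0 (peak : Int) 1).all fun i =>
          !decide (PySem.List.pyGetD data i 0 > PySem.List.pyGetD data (i + 1) 0)) &&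
      ((PySem.List.pyRange (peak : Int) ((data.length : Int) - 1) 1).all fun i =>
          !decide (PySem.List.pyGetD data i 0 < PySem.List.pyGetD data (i + 1) 0))
  else false

-- the candidate test 'data[i] not in subset or (data[i] > subset[-1] and is_mountain(subset + [data[i]]))'
-- (textually identical in both Python sources, so shared by both ports)
def mCond (data subset : List Int) (i : Nat) : Bool :=
  let x := PySem.List.pyGetD data (i : Int) 0
  !(subset.contains x) ||
    (decide (x > PySem.List.pyGetD subset (-1) 0) && is_mountain (subset ++ [x]))

-- A's inner 'while i < length' loop: pushes candidate states onto the stack (top = list head)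
def pvInner (data subset : List Int) (index : Int) (i : Nat)
    (stack : List (Int × List Int × Nat)) : List (Int × List Int × Nat) :=
  if i < data.length then
    pvInner data subset index (i + 1)
      (if mCond data subset i then
        (index + 1, subset ++ [PySem.List.pyGetD data (i : Int) 0], i + 1) :: stack
      else stack)
  else stack
termination_by data.length - i
decreasing_by exact Nat.sub_succ_lt_self _ _ ‹_›

-- termination helpers for A's outer while loop (weight of a stack entry / of the stack)
def pvWeight (L : Nat) (st : Int × List Int × Nat) : Nat := 2 ^ (L + 1 - st.2.2)
def pvWSum (L : Nat) (stack : List (Int × List Int × Nat)) : Nat := (stack.map (pvWeight L)).sum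

-- small abstract arithmetic facts, kept separate so the termination proofs stay small
theorem pvArithStep (A S' S p : Nat) (hp : 2 ≤ p) (h1 : A ≤ S' + (p - 2))
    (h2 : S' ≤ S + p) : A ≤ S + (p * 2 - 2) := by omega

theorem pvArithPop (A S p : Nat) (hp : 1 ≤ p) (h : A ≤ S + (p - 2)) : A < p + S := by omega

theorem pvArithDec (a b c : Nat) (h1 : a ≤ b) (h2 : b < c) : c + 1 - (b + 1) < c + 1 - a := by
  omega

theorem pvSplit1 (L i : Nat) (h : i < L) : L + 1 - i = (L - i) + 1 := by omega

theorem pvSplit2 (L i : Nat) : L + 1 - (i + 1) = L - i := by omega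

theorem pvTwoLe (L i : Nat) (h : i < L) : 2 ≤ 2 ^ (L - i) :=
  Nat.one_lt_two_pow_iff.2 (Nat.sub_ne_zero_of_lt h)

theorem pvInner_wsum_le (data subset : List Int) (index : Int) (i : Nat)
    (stack : List (Int × List Int × Nat)) :
    pvWSum data.length (pvInner data subset index i stack) ≤
      pvWSum data.length stack + (2 ^ (data.length + 1 - i) - 2) := by
  induction i, stack using pvInner.induct data subset index with
  | case1 i stack h ih =>
    simp only [dite_eq_ite] at ih
    rw [pvInner, if_pos h]
    rw [pvSplit1 data.length i h, Nat.pow_succ]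
    rw [pvSplit2 data.length i] at ih
    refine pvArithStep _ _ _ _ (pvTwoLe data.length i h) ih ?_
    split
    · simp only [pvWSum, pvWeight, List.map_cons, List.sum_cons, pvSplit2]
      exact Nat.le_of_eq (Nat.add_comm _ _)
    · exact Nat.le_add_right _ _
  | case2 i stack h =>
    rw [pvInner, if_neg h]
    exact Nat.le_add_right _ _

theorem pvOuter_dec (data subset : List Int) (index : Int) (i : Nat)
    (rest : List (Int × List Int × Nat)) :
    pvWSum data.length (pvInner data subset index i rest) <
      pvWSum data.length ((index, subset, i) :: rest) := by
  have h := pvInner_wsum_le data subset index i rest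
  have hp : 1 ≤ 2 ^ (data.length + 1 - i) := Nat.one_le_two_pow
  simp only [pvWSum, pvWeight, List.map_cons, List.sum_cons]
  exact pvArithPop _ _ _ hp h

-- A's outer 'while stack' loop
def pvOuter (data : List Int) (stack : List (Int × List Int × Nat))
    (res : List (List Int)) : List (List Int) :=
  match stack with
  | [] => res
  | st :: rest =>
    pvOuter data (pvInner data st.2.1 st.1 st.2.2 rest)
      (if is_mountain st.2.1 then res ++ [st.2.1] else res)
termination_by pvWSum data.length stack
decreasing_by exact pvOuter_dec data st.2.1 st.1 st.2.2 rest

def mountain_iter_different (data : List Int) : List (List Int) :=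
  pvOuter data [(0, [], 0)] []

-- ===== PORT B =====
theorem pvRecurse_dec (L start : Nat) (j : Int)
    (hm : j ∈ PySem.List.pyRange ((L : Int) - 1) ((start : Int) - 1) (-1)) :
    L + 1 - (j.toNat + 1) < L + 1 - start := by
  obtain ⟨h1, h2⟩ := (PySem.List.mem_pyRange_neg_one).1 hm
  have hs : (start : Int) ≤ j := Int.le_of_sub_one_lt h1
  have hj : (0 : Int) ≤ j := le_trans (Int.natCast_nonneg start) hs
  have ha : start ≤ j.toNat := (Int.le_toNat hj).2 hs
  have hjL : j < (L : Int) := lt_of_le_of_lt h2 (sub_one_lt _)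
  have hLpos : 0 < L := Int.natCast_pos.1 (lt_of_le_of_lt hj hjL)
  have hb : j.toNat < L := (Int.toNat_lt' hLpos).2 hjL
  exact pvArithDec start j.toNat L ha hb

-- B's recursive backtracking helper: emit subset if mountain, then for i descending
-- from n-1 down to start, try each admissible candidate and recurse
def pvRecurse (data subset : List Int) (start : Nat) : List (List Int) :=
  (PySem.List.pyRange ((data.length : Int) - 1) ((start : Int) - 1) (-1)).attach.foldl
    (fun out j =>
      if mCond data subset j.1.toNat then
        out ++ pvRecurse data (subset ++ [PySem.List.pyGetD data j.1 0]) (j.1.toNat + 1)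
      else out)
    (if is_mountain subset then [subset] else [])
termination_by data.length + 1 - start
decreasing_by exact pvRecurse_dec data.length start j.1 j.2

def mountain_iter_different_alt (data : List Int) : List (List Int) :=
  pvRecurse data [] 0

-- ===== PRECONDITION & SPEC =====
def Spec_mountain_iter_different (data : List Int) (out : List (List Int)) : Prop := out = mountain_iter_different_alt data
instance (data : List Int) (out : List (List Int)) : Decidable (Spec_mountain_iter_different data out) := by unfold Spec_mountain_iter_different; infer_instance

-- ===== CLAIM (what is proved, stated in full; the proofs are below) =====
def Claim_equal_mountain_iter_different : Prop := ∀ (data : List Int), Dom_mountain_iter_different data → Spec_mountain_iter_different data (mountain_iter_different data)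

-- ===== LEMMAS AND PROOFS =====

-- the list of child states A's inner loop pushes, from the top of the stack down
-- (descending candidate index: the loop runs i ascending and each push goes on top)
def pvChl (data subset : List Int) (index : Int) (i : Nat) : List (Int × List Int × Nat) :=
  if i < data.length then
    pvChl data subset index (i + 1) ++
      (if mCond data subset i then
        [(index + 1, subset ++ [PySem.List.pyGetD data (i : Int) 0], i + 1)]
      else [])
  else []
termination_by data.length - i
decreasing_by exact Nat.sub_succ_lt_self _ _ ‹_›

theorem pvInner_eq_chl (data subset : List Int) (index : Int) (i : Nat)
    (stack : List (Int × List Int × Nat)) :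
    pvInner data subset index i stack = pvChl data subset index i ++ stack := by
  induction i, stack using pvInner.induct data subset index with
  | case1 i stack h ih =>
    simp only [dite_eq_ite] at ih
    rw [pvInner, if_pos h, pvChl, if_pos h, ih]
    split <;> simp
  | case2 i stack h =>
    rw [pvInner, if_neg h, pvChl, if_neg h, List.nil_append]

def pvVisit (data : List Int) (st : Int × List Int × Nat) : List (List Int) :=
  pvRecurse data st.2.1 st.2.2

theorem pvRecurse_eq_chl (data subset : List Int) (index : Int) (start : Nat) :
    pvRecurse data subset start =
      (if is_mountain subset then [subset] else []) ++
        (pvChl data subset index start).flatMap (pvVisit data) := by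
  rw [pvRecurse, List.foldl_attach (f := fun out (j : Int) =>
    if mCond data subset j.toNat = true then
      out ++ pvRecurse data (subset ++ [PySem.List.pyGetD data j 0]) (j.toNat + 1)
    else out)]
  have key : ∀ (d i : Nat), data.length - i ≤ d → ∀ (init : List (List Int)),
      (PySem.List.pyRange ((data.length : Int) - 1) ((i : Int) - 1) (-1)).foldl
        (fun out j =>
          if mCond data subset j.toNat = true then
            out ++ pvRecurse data (subset ++ [PySem.List.pyGetD data j 0]) (j.toNat + 1)
          else out) init
      = init ++ (pvChl data subset index i).flatMap (pvVisit data) := by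
    intro d
    induction d with
    | zero =>
      intro i hi init
      rw [PySem.List.pyRange_neg_one_eq_nil (by omega), pvChl, if_neg (by omega)]
      simp
    | succ d ihd =>
      intro i hi init
      by_cases h : i < data.length
      · have hrange : PySem.List.pyRange ((data.length : Int) - 1) ((i : Int) - 1) (-1) =
            PySem.List.pyRange ((data.length : Int) - 1) (((i + 1 : Nat) : Int) - 1) (-1)
              ++ [(i : Int)] := by
          rw [PySem.List.pyRange_neg_one_eq_reverse, PySem.List.pyRange_neg_one_eq_reverse,
            PySem.List.pyRange_one_cons (by omega)]
          push_cast
          simp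
        rw [hrange, List.foldl_append, ihd (i + 1) (by omega)]
        conv_rhs => rw [pvChl, if_pos h]
        simp only [List.foldl_cons, List.foldl_nil, Int.toNat_natCast, List.flatMap_append]
        split
        · simp [pvVisit, List.append_assoc]
        · simp
      · rw [PySem.List.pyRange_neg_one_eq_nil (by omega), pvChl, if_neg h]
        simp
  exact key (data.length - start) start (le_refl _) _

theorem pvOuter_eq_flatMap (data : List Int) (stack : List (Int × List Int × Nat))
    (res : List (List Int)) :
    pvOuter data stack res = res ++ stack.flatMap (pvVisit data) := by
  induction stack, res using pvOuter.induct data with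
  | case1 res => simp [pvOuter]
  | case2 res st rest ih =>
    simp only [dite_eq_ite] at ih
    rw [pvOuter, ih, pvInner_eq_chl, List.flatMap_append, List.flatMap_cons]
    have hv : pvVisit data st =
        (if is_mountain st.2.1 then [st.2.1] else []) ++
          (pvChl data st.2.1 st.1 st.2.2).flatMap (pvVisit data) :=
      pvRecurse_eq_chl data st.2.1 st.1 st.2.2
    rw [hv]
    split <;> simp [List.append_assoc]

-- ===== VERDICT (by name: the statement is the Claim_ definition above) =====
theorem mountain_iter_different_spec : Claim_equal_mountain_iter_different := by
  intro data _
  unfold Spec_mountain_iter_different mountain_iter_different mountain_iter_different_alt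
  rw [pvOuter_eq_flatMap]
  simp [pvVisit]
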